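-- pv_equiv track=rewrite | github.com/yasukei/junk | ex/atcoder/ahc036/main_v7.py | path_is_in_B
-- ===== SOURCE A (Python) =====
-- def path_is_in_B(path, B):
--     length = len(path)
--     for i in range(len(B) - length + 1):
--         if B[i:i+length] == path:
--             return True
--
--     r_path = list(reversed(path))
--     for i in range(len(B) - length + 1):
--         if B[i:i+length] == r_path:
--             return True
--
--     return False
-- ===== SOURCE B (Python) =====
-- def path_is_in_B(path, B):
--     # Exact Rabin-Karp: encode every length-m window of B as an integer in a
--     # radix wide enough to make the encoding injective, roll the window value
--     # across B once, and compare it against the encodings of path and of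
--     # reversed(path).
--     m, n = len(path), len(B)
--     if m > n:
--         return False
--     off = 1
--     for x in path + B:
--         off = max(off, abs(x) + 1)
--     base = 2 * off
--     hp = hr = 0
--     pw = 1
--     for x in path:
--         hp = hp * base + (x + off)
--         hr = hr + (x + off) * pw
--         pw = pw * base
--     h = 0
--     for x in B[:m]:
--         h = h * base + (x + off)
--     if h == hp or h == hr:
--         return True
--     top = base ** (m - 1) if m else 0
--     for old, new in zip(B, B[m:]):
--         h = (h - (old + off) * top) * base + (new + off)
--         if h == hp or h == hr:
--             return True
--     return False
-- ===== Notes on version B (the rewrite author's own statement) =====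
-- stated objective: alternative
-- what changed: Replaces the slice-compare-at-every-offset scan (done twice, for path and reversed path) with an exact Rabin-Karp: every length-m window of B is encoded as an integer in a radix wide enough to make the encoding injective, the window code is rolled across B in one pass and compared against the codes of path and reversed(path).
import Mathlib
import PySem

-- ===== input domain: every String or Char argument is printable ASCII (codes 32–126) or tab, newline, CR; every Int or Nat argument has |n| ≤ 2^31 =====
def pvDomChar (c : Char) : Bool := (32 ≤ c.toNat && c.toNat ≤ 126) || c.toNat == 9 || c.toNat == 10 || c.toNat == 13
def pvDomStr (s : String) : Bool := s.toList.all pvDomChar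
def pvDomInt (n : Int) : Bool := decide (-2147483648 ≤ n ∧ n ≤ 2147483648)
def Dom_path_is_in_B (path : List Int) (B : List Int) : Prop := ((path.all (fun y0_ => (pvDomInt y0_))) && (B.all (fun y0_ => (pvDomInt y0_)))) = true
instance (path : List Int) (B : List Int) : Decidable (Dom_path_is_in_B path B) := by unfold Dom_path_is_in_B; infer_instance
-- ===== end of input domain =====

-- B replaces A's slice-compare-at-every-offset scan by an exact Rabin-Karp
-- (injective radix window encoding, rolled across B once); return value proved identical.

-- ===== PORT A =====
def path_is_in_B (path : List Int) (B : List Int) : Bool :=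
  let length : Int := path.length
  if (PySem.List.pyRange 0 ((B.length : Int) - length + 1) 1).any
      (fun i => PySem.List.slice B (some i) (some (i + length)) == path) then
    true
  else
    let r_path := path.reverse
    if (PySem.List.pyRange 0 ((B.length : Int) - length + 1) 1).any
        (fun i => PySem.List.slice B (some i) (some (i + length)) == r_path) then
      true
    else
      false

-- ===== PORT B =====
-- the roll loop of Source B: update the window code, early-return on a hit
def pvRoll (base off top hp hr : Int) : Int → List (Int × Int) → Bool
  | _, [] => false
  | h, (old, nw) :: rest =>
      let h2 := (h - (old + off) * top) * base + (nw + off)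
      if h2 == hp || h2 == hr then true else pvRoll base off top hp hr h2 rest

def path_is_in_B_alt (path : List Int) (B : List Int) : Bool :=
  let m := path.length
  let n := B.length
  if m > n then false
  else
    let off := (path ++ B).foldl (fun a x => max a (|x| + 1)) 1
    let base := 2 * off
    -- single pass over path computing (hp, hr, pw)
    let t := path.foldl (fun (acc : Int × Int × Int) x =>
        (acc.1 * base + (x + off), acc.2.1 + (x + off) * acc.2.2, acc.2.2 * base)) (0, 0, 1)
    let hp := t.1
    let hr := t.2.1
    let h := (PySem.List.slice B none (some (m : Int))).foldl (fun h x => h * base + (x + off)) 0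
    if h == hp || h == hr then true
    else
      let top : Int := if m = 0 then 0 else base ^ (m - 1)
      pvRoll base off top hp hr h (B.zip (PySem.List.slice B (some (m : Int)) none))

-- ===== PRECONDITION & SPEC =====
def Spec_path_is_in_B (path : List Int) (B : List Int) (out : Bool) : Prop := out = path_is_in_B_alt path B
instance (path : List Int) (B : List Int) (out : Bool) : Decidable (Spec_path_is_in_B path B out) := by unfold Spec_path_is_in_B; infer_instance

-- ===== CLAIM (what is proved, stated in full; the proofs are below) =====
def Claim_equal_path_is_in_B : Prop := ∀ (path : List Int) (B : List Int), Dom_path_is_in_B path B → Spec_path_is_in_B path B (path_is_in_B path B)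

-- ===== LEMMAS AND PROOFS =====

/-- The radix encoding of a list (the value Source B's hash loops compute). -/
def pvEnc (base off : Int) (l : List Int) : Int :=
  l.foldl (fun h x => h * base + (x + off)) 0

/-- The length-m window of B at offset k. -/
def pvW (B : List Int) (m k : Nat) : List Int := (B.drop k).take m

theorem pvEnc_foldl (base off : Int) : ∀ (l : List Int) (a : Int),
    l.foldl (fun h x => h * base + (x + off)) a = a * base ^ l.length + pvEnc base off l := by
  intro l
  induction l with
  | nil => intro a; simp [pvEnc]
  | cons x t ih =>
    intro a
    have hx : pvEnc base off (x :: t) = (x + off) * base ^ t.length + pvEnc base off t := by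
      show List.foldl _ _ _ = _
      rw [List.foldl_cons, ih (0 * base + (x + off))]
      ring
    rw [List.foldl_cons, ih (a * base + (x + off)), hx]
    simp [pow_succ]
    ring

theorem pvEnc_cons (base off x : Int) (t : List Int) :
    pvEnc base off (x :: t) = (x + off) * base ^ t.length + pvEnc base off t := by
  show List.foldl _ _ _ = _
  rw [List.foldl_cons, pvEnc_foldl]
  ring

theorem pvEnc_append_singleton (base off x : Int) (l : List Int) :
    pvEnc base off (l ++ [x]) = pvEnc base off l * base + (x + off) := by
  show List.foldl _ _ _ = _
  rw [List.foldl_append]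
  simp [pvEnc]

theorem pvEnc_bounds (off : Int) (hoff : 1 ≤ off) : ∀ (l : List Int),
    (∀ x ∈ l, |x| < off) → 0 ≤ pvEnc (2 * off) off l ∧ pvEnc (2 * off) off l < (2 * off) ^ l.length := by
  intro l
  induction l with
  | nil => intro _; refine ⟨le_refl 0, ?_⟩; simp [pvEnc]
  | cons x t ih =>
    intro hd
    have hx : |x| < off := hd x (by simp)
    have ht := ih (fun y hy => hd y (by simp [hy]))
    have hK : (0:Int) < (2 * off) ^ t.length := by positivity
    rw [pvEnc_cons]
    constructor
    · have h1 : (0:Int) ≤ x + off := by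
        have := abs_lt.mp hx; omega
      nlinarith [ht.1]
    · have h2 : x + off ≤ 2 * off - 1 := by
        have := abs_lt.mp hx; omega
      have : (x + off) * (2 * off) ^ t.length + pvEnc (2 * off) off t
          < (2 * off) * (2 * off) ^ t.length := by
        nlinarith [ht.2, ht.1]
      calc (x + off) * (2 * off) ^ t.length + pvEnc (2 * off) off t
          < (2 * off) * (2 * off) ^ t.length := this
        _ = (2 * off) ^ (x :: t).length := by rw [List.length_cons, pow_succ]; ring

theorem pvEnc_inj (off : Int) (hoff : 1 ≤ off) : ∀ (p q : List Int),
    p.length = q.length → (∀ x ∈ p, |x| < off) → (∀ x ∈ q, |x| < off) →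
    pvEnc (2 * off) off p = pvEnc (2 * off) off q → p = q := by
  intro p
  induction p with
  | nil =>
    intro q hlen _ _ _
    exact (List.length_eq_zero_iff.mp hlen.symm).symm
  | cons a t ih =>
    intro q hlen hdp hdq henc
    cases q with
    | nil => simp at hlen
    | cons b u =>
      have hlen' : t.length = u.length := by simpa using hlen
      rw [pvEnc_cons, pvEnc_cons, hlen'] at henc
      have hbt := pvEnc_bounds off hoff t (fun y hy => hdp y (by simp [hy]))
      have hbu := pvEnc_bounds off hoff u (fun y hy => hdq y (by simp [hy]))
      rw [hlen'] at hbt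
      have hK : (0:Int) < (2 * off) ^ u.length := by positivity
      have hab : a = b := by nlinarith [hbt.1, hbt.2, hbu.1, hbu.2]
      subst hab
      have htu : pvEnc (2 * off) off t = pvEnc (2 * off) off u := by
        have := henc; omega
      rw [ih u hlen' (fun y hy => hdp y (by simp [hy])) (fun y hy => hdq y (by simp [hy])) htu]

/-- Source B's single pattern pass computes the codes of path and reversed path. -/
theorem pvPatPass_eq (base off : Int) : ∀ (l : List Int) (a b c : Int),
    l.foldl (fun (acc : Int × Int × Int) x =>
        (acc.1 * base + (x + off), acc.2.1 + (x + off) * acc.2.2, acc.2.2 * base)) (a, b, c)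
      = (a * base ^ l.length + pvEnc base off l, b + pvEnc base off l.reverse * c, c * base ^ l.length) := by
  intro l
  induction l with
  | nil => intro a b c; simp [pvEnc]
  | cons x t ih =>
    intro a b c
    rw [List.foldl_cons, ih]
    have hrev : pvEnc base off (x :: t).reverse = pvEnc base off t.reverse * base + (x + off) := by
      rw [List.reverse_cons, pvEnc_append_singleton]
    rw [hrev, pvEnc_cons]
    simp [pow_succ]
    constructor
    · ring
    · constructor <;> ring

theorem pvW_length (B : List Int) (m k : Nat) (h : k + m ≤ B.length) : (pvW B m k).length = m := by
  simp [pvW]; omega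

theorem pv_any_congr_mem {α : Type} {l : List α} {f g : α → Bool}
    (h : ∀ x ∈ l, f x = g x) : l.any f = l.any g := by
  induction l with
  | nil => rfl
  | cons x t ih =>
    simp only [List.any_cons, h x (by simp), ih (fun y hy => h y (by simp [hy]))]

/-- One roll step: from window k to window k+1 (0 < m, k + m < |B|). -/
theorem pvRoll_step (base off : Int) (B : List Int) (m k : Nat) (hm : 0 < m)
    (h : k + m < B.length) :
    (pvEnc base off (pvW B m k) - (B[k]'(by omega) + off) * base ^ (m - 1)) * base
      + (B[k + m]'(by omega) + off) = pvEnc base off (pvW B m (k + 1)) := by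
  obtain ⟨m', rfl⟩ : ∃ m', m = m' + 1 := ⟨m - 1, by omega⟩
  have hdk : B.drop k = B[k]'(by omega) :: B.drop (k + 1) := List.drop_eq_getElem_cons (by omega)
  have h1 : pvW B (m' + 1) k = B[k]'(by omega) :: (B.drop (k + 1)).take m' := by
    rw [pvW, hdk, List.take_succ_cons]
  have hlen : ((B.drop (k + 1)).take m').length = m' := by simp; omega
  have h2 : pvW B (m' + 1) (k + 1) = (B.drop (k + 1)).take m' ++ [B[k + m' + 1]'(by omega)] := by
    rw [pvW, List.take_add_one]
    congr 1
    have hidx : k + 1 + m' = k + m' + 1 := by omega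
    have : (B.drop (k + 1))[m']? = some (B[k + m' + 1]'(by omega)) := by
      rw [List.getElem?_drop, hidx, List.getElem?_eq_getElem (by omega)]
    simp [this]
  rw [h1, h2, pvEnc_cons, pvEnc_append_singleton, hlen]
  have : k + (m' + 1) = k + m' + 1 := by omega
  simp only [Nat.add_sub_cancel, this]
  ring

/-- The roll loop equals the scan of all later windows. -/
theorem pvRoll_eq_any (base off hp hr : Int) (B : List Int) (m : Nat) (hm : 0 < m) :
    ∀ (c k : Nat), k + m + c = B.length →
    pvRoll base off (base ^ (m - 1)) hp hr (pvEnc base off (pvW B m k))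
        ((B.drop k).zip (B.drop (k + m)))
      = (List.range c).any (fun j =>
          pvEnc base off (pvW B m (k + 1 + j)) == hp || pvEnc base off (pvW B m (k + 1 + j)) == hr) := by
  intro c
  induction c with
  | zero =>
    intro k hk
    have : B.drop (k + m) = [] := List.drop_eq_nil_of_le (by omega)
    simp [this, pvRoll]
  | succ c ih =>
    intro k hk
    have hk1 : k + m < B.length := by omega
    have hdk : B.drop k = B[k]'(by omega) :: B.drop (k + 1) := List.drop_eq_getElem_cons (by omega)
    have hdkm : B.drop (k + m) = B[k + m]'(by omega) :: B.drop (k + m + 1) :=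
      List.drop_eq_getElem_cons (by omega)
    rw [hdk, hdkm, List.zip_cons_cons]
    show (if _ then _ else _) = _
    rw [pvRoll_step base off B m k hm hk1]
    by_cases hhit : (pvEnc base off (pvW B m (k + 1)) == hp || pvEnc base off (pvW B m (k + 1)) == hr) = true
    · rw [if_pos hhit]
      symm
      apply List.any_eq_true.mpr
      refine ⟨0, by simp, ?_⟩
      simpa using hhit
    · have hhit' : (pvEnc base off (pvW B m (k + 1)) == hp || pvEnc base off (pvW B m (k + 1)) == hr) = false := by
        simpa using hhit
      rw [if_neg hhit]
      have hrest : B.drop (k + m + 1) = B.drop (k + 1 + m) := by congr 1; omega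
      have hk2 : k + 1 + m + c = B.length := by omega
      rw [hrest, ih (k + 1) hk2]
      rw [List.range_succ_eq_map, List.any_cons, List.any_map]
      simp only [Nat.add_zero, hhit', Bool.false_or]
      apply pv_any_congr_mem
      intro j _
      simp only [Function.comp, Nat.succ_eq_add_one]
      have hidx : k + 1 + 1 + j = k + 1 + (j + 1) := by omega
      rw [hidx]

/-- A's pyRange/slice scan equals the Nat-range window scan (pattern length ≤ |B|). -/
theorem pyRange_any_eq (p b : List Int) (h : p.length ≤ b.length) :
    (PySem.List.pyRange 0 ((b.length : Int) - (p.length : Int) + 1) 1).any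
      (fun i => PySem.List.slice b (some i) (some (i + (p.length : Int))) == p)
    = (List.range (b.length - p.length + 1)).any (fun k => ((b.drop k).take p.length == p)) := by
  rw [PySem.List.pyRange_one, List.any_map]
  have htn : (((b.length : Int) - (p.length : Int) + 1) - 0).toNat = b.length - p.length + 1 := by omega
  rw [htn]
  apply pv_any_congr_mem
  intro k _
  simp only [Function.comp_apply, zero_add]
  rw [show ((k : Int) + ((p.length : Nat) : Int)) = (((k + p.length : Nat) : Int)) by push_cast; ring]
  rw [show (((k + p.length : Nat) : Int)) = ((k : Int) + ((p.length : Nat) : Int)) by push_cast; ring,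
    PySem.List.slice_natCast_add]

theorem pyRange_any_empty (p b : List Int) (h : b.length < p.length) :
    (PySem.List.pyRange 0 ((b.length : Int) - (p.length : Int) + 1) 1).any
      (fun i => PySem.List.slice b (some i) (some (i + (p.length : Int))) == p) = false := by
  rw [PySem.List.pyRange_one]
  have htn : (((b.length : Int) - (p.length : Int) + 1) - 0).toNat = 0 := by omega
  rw [htn]
  simp

theorem any_or_split {α : Type} (l : List α) (f g : α → Bool) :
    l.any (fun x => f x || g x) = (l.any f || l.any g) := by
  induction l with
  | nil => simp
  | cons x t ih =>
    simp only [List.any_cons, ih]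
    cases f x <;> cases g x <;> cases t.any f <;> cases t.any g <;> rfl

/-- The code comparison at a valid offset is the window comparison. -/
theorem enc_beq_eq (off : Int) (hoff : 1 ≤ off) (pat B : List Int) (m k : Nat)
    (hm : pat.length = m) (hk : k + m ≤ B.length)
    (hdp : ∀ x ∈ pat, |x| < off) (hdB : ∀ x ∈ B, |x| < off) :
    (pvEnc (2 * off) off (pvW B m k) == pvEnc (2 * off) off pat) = (pvW B m k == pat) := by
  have hdw : ∀ x ∈ pvW B m k, |x| < off := fun x hx =>
    hdB x (List.mem_of_mem_drop (List.mem_of_mem_take hx))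
  rw [Bool.eq_iff_iff, beq_iff_eq, beq_iff_eq]
  constructor
  · intro he
    exact pvEnc_inj off hoff _ _ (by rw [pvW_length B m k hk, hm]) hdw hdp he
  · intro he; rw [he]

-- ===== VERDICT (by name: the statement is the Claim_ definition above) =====
theorem path_is_in_B_spec : Claim_equal_path_is_in_B := by
  intro path B _
  unfold Spec_path_is_in_B
  simp only [path_is_in_B, path_is_in_B_alt]
  by_cases hmn : path.length ≤ B.length
  case neg =>
    have h2 : (PySem.List.pyRange 0 ((B.length : Int) - (path.length : Int) + 1) 1).any
        (fun i => PySem.List.slice B (some i) (some (i + (path.length : Int))) == path.reverse) = false := by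
      rw [show ((path.length : Nat) : Int) = ((path.reverse.length : Nat) : Int) by simp]
      exact pyRange_any_empty path.reverse B (by simp; omega)
    rw [pyRange_any_empty path B (by omega), h2,
      if_pos (show path.length > B.length by omega)]
    simp
  case pos =>
    rw [if_neg (by omega : ¬ path.length > B.length)]
    -- name the radix offset
    have hoffmax := PySem.List.le_foldl_max_int (path ++ B) (fun x => |x| + 1) 1
    generalize hoffe : (path ++ B).foldl (fun a x => max a (|x| + 1)) 1 = off
    have hoff1 : 1 ≤ off := by rw [← hoffe]; exact hoffmax.1
    have hdig : ∀ x ∈ path ++ B, |x| < off := by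
      intro x hx
      have h := hoffmax.2 x hx
      rw [hoffe] at h
      omega
    have hdp : ∀ x ∈ path, |x| < off := fun x hx => hdig x (by simp [hx])
    have hdB : ∀ x ∈ B, |x| < off := fun x hx => hdig x (by simp [hx])
    have hdr : ∀ x ∈ path.reverse, |x| < off := fun x hx => hdp x (by simpa using hx)
    -- the pattern pass computes the two pattern codes
    rw [pvPatPass_eq (2 * off) off path 0 0 1]
    simp only [zero_mul, zero_add, mul_one]
    -- the initial window code
    rw [PySem.List.slice_to_natCast, PySem.List.slice_from_natCast]
    have hinit : List.foldl (fun h x => h * (2 * off) + (x + off)) 0 (B.take path.length)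
        = pvEnc (2 * off) off (pvW B path.length 0) := by
      simp only [pvW, List.drop_zero]
      rfl
    rw [hinit]
    -- A's two scans as Nat-range window scans
    have hA1 := pyRange_any_eq path B hmn
    have hA2 : (PySem.List.pyRange 0 ((B.length : Int) - (path.length : Int) + 1) 1).any
          (fun i => PySem.List.slice B (some i) (some (i + (path.length : Int))) == path.reverse)
        = (List.range (B.length - path.length + 1)).any
            (fun k => ((B.drop k).take path.reverse.length == path.reverse)) := by
      rw [show ((path.length : Nat) : Int) = ((path.reverse.length : Nat) : Int) by simp]
      rw [pyRange_any_eq path.reverse B (by simpa using hmn)]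
      simp
    rw [hA1, hA2]
    simp only [List.length_reverse]
    -- the hit test at a valid offset
    have hitEq : ∀ k : Nat, k + path.length ≤ B.length →
        ((pvEnc (2 * off) off (pvW B path.length k) == pvEnc (2 * off) off path
          || pvEnc (2 * off) off (pvW B path.length k) == pvEnc (2 * off) off path.reverse))
        = (((B.drop k).take path.length == path) || ((B.drop k).take path.length == path.reverse)) := by
      intro k hk
      rw [show (B.drop k).take path.length = pvW B path.length k from rfl,
        enc_beq_eq off hoff1 path B path.length k rfl hk hdp hdB,
        enc_beq_eq off hoff1 path.reverse B path.length k (by simp) hk hdr hdB]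
    rcases Nat.eq_zero_or_pos path.length with hm0 | hmpos
    · -- empty pattern: both sides succeed at offset 0
      have hpe : path = [] := List.length_eq_zero_iff.mp hm0
      have hcB : ((pvEnc (2 * off) off (pvW B path.length 0) == pvEnc (2 * off) off path)
          || (pvEnc (2 * off) off (pvW B path.length 0) == pvEnc (2 * off) off path.reverse)) = true := by
        simp [pvW, pvEnc, hpe]
      rw [if_pos hcB]
      have hany : ((List.range (B.length - path.length + 1)).any
          (fun k => ((B.drop k).take path.length == path))) = true := by
        refine List.any_eq_true.mpr ⟨0, ?_, ?_⟩ <;> simp [hpe]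
      rw [if_pos hany]
    · -- nonempty pattern: initial check + rolled scan
      rw [if_neg (by omega : ¬ path.length = 0)]
      have harg : 0 + path.length + (B.length - path.length) = B.length := by omega
      have hroll := pvRoll_eq_any (2 * off) off (pvEnc (2 * off) off path)
        (pvEnc (2 * off) off path.reverse) B path.length hmpos (B.length - path.length) 0 harg
      simp only [List.drop_zero, Nat.zero_add] at hroll
      have hsplit : ∀ (p : Nat → Bool),
          (List.range (B.length - path.length + 1)).any p
          = (p 0 || (List.range (B.length - path.length)).any (fun j => p (1 + j))) := by
        intro p
        rw [List.range_succ_eq_map, List.any_cons, List.any_map]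
        congr 1
        apply pv_any_congr_mem
        intro j _
        simp only [Function.comp]
        congr 1
        omega
      have hif : ∀ (a b : Bool),
          (if a = true then true else if b = true then true else false) = (a || b) := by decide
      rw [hif, hsplit (fun k => ((B.drop k).take path.length == path)),
        hsplit (fun k => ((B.drop k).take path.length == path.reverse))]
      by_cases h0 : ((pvEnc (2 * off) off (pvW B path.length 0) == pvEnc (2 * off) off path)
          || (pvEnc (2 * off) off (pvW B path.length 0) == pvEnc (2 * off) off path.reverse)) = true
      · rw [if_pos h0]
        rw [hitEq 0 (by omega)] at h0
        rcases Bool.or_eq_true_iff.mp h0 with hF | hG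
        · rw [hF]
          simp
        · rw [hG]
          simp
      · rw [if_neg h0]
        have h0' : (((B.drop 0).take path.length == path)
            || ((B.drop 0).take path.length == path.reverse)) = false := by
          rw [← hitEq 0 (by omega)]
          simpa using h0
        rcases Bool.or_eq_false_iff.mp h0' with ⟨hF, hG⟩
        rw [hF, hG, hroll]
        simp only [Bool.false_or]
        have hR : (List.range (B.length - path.length)).any (fun j =>
              pvEnc (2 * off) off (pvW B path.length (0 + 1 + j)) == pvEnc (2 * off) off path
              || pvEnc (2 * off) off (pvW B path.length (0 + 1 + j)) == pvEnc (2 * off) off path.reverse)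
            = (List.range (B.length - path.length)).any (fun j =>
              (((B.drop (1 + j)).take path.length == path)
                || ((B.drop (1 + j)).take path.length == path.reverse))) := by
          apply pv_any_congr_mem
          intro j hj
          have hj' : j < B.length - path.length := List.mem_range.mp hj
          rw [show 0 + 1 + j = 1 + j by omega]
          exact hitEq (1 + j) (by omega)
        rw [hR, any_or_split]
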